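-- pv_equiv track=rewrite | github.com/Vprtp/opifex | lib/textprocessing.py | deleteSentence
-- ===== SOURCE A (Python) =====
-- sentenceSeparators:list[str] = ['\n', '.', '?', '!'] #note that these MUST be SINGLE CHARACTERS
--
-- def deleteSentence(text:str, index:int, separators:list[str]=sentenceSeparators) -> str:
--     """
--     Given the index of a character in a given text, removes the whole sentence where it is contained and returns the modified string.
--     A sentence is defined as the maximal substring that does not contain any of the provided separator strings.
--     The separator that ends the sentence (if present) is also removed.
--     If `index` falls inside a separator, that separator is considered part of the sentence it terminates.
--     """
--     if not 0 <= index < len(text):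
--         raise ValueError("Index out of range")
--     # If no separators are given, the whole text is one sentence
--     if not separators:
--         return ""
--
--     n = len(text)
--     # 1. Find the start of the sentence (character right after the last separator before index)
--     start = 0
--     for i in range(index - 1, -1, -1):
--         if text[i] in separators:
--             start = i + 1
--             break
--     # 2. Find the end of the sentence (the next separator at or after index, or the end of text)
--     end = n
--     for i in range(index, n):
--         if text[i] in separators:
--             end = i + 1   # include the separator itself
--             break
--     # 3. Remove the slice from start to end
--     return text[:start] + text[end:]
-- ===== SOURCE B (Python) =====
-- sentenceSeparators:list[str] = ['\n', '.', '?', '!']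
--
-- def deleteSentence(text:str, index:int, separators:list[str]=sentenceSeparators) -> str:
--     if not 0 <= index < len(text):
--         raise ValueError("Index out of range")
--     if not separators:
--         return ""
--     # Build the table of all separator positions in one pass, then splice around index.
--     seps = [i for i, c in enumerate(text) if c in separators]
--     before = [p for p in seps if p < index]
--     after = [p for p in seps if p >= index]
--     start = before[-1] + 1 if before else 0
--     end = after[0] + 1 if after else len(text)
--     return text[:start] + text[end:]
-- ===== Notes on version B (the rewrite author's own statement) =====
-- stated objective: alternative
-- what changed: Instead of two directional scans outward from index (backward with break for the sentence start, forward with break for the end), B builds the full table of separator positions in one enumerate pass and splices using the last position before index and the first at/after it.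
import Mathlib
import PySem

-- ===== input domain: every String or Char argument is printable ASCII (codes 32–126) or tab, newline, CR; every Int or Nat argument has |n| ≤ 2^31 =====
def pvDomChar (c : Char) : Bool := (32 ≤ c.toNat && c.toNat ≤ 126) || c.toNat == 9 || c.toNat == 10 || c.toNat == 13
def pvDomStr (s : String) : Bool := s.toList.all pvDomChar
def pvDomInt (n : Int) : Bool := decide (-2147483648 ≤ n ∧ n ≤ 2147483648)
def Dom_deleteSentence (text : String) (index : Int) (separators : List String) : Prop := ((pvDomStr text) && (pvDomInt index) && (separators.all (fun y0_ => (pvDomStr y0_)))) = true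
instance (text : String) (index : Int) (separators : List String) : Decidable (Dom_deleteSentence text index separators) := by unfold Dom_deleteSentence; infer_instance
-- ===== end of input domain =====

-- B replaces A's two directional scans outward from `index` by one enumerate pass
-- building the table of all separator positions, then splices around `index` (alternative decomposition).


-- ===== PORT A =====
-- loop 1 of A: for i in range(index-1, -1, -1): if text[i] in separators: start = i+1; break
-- (argument is one past the loop's first i; `getD` is exact since Pre_ keeps the index in range)
def aStart (cs : List Char) (seps : List String) : Nat → Nat
  | 0 => 0
  | i + 1 => if seps.contains (String.mk [cs.getD i ' ']) then i + 1 else aStart cs seps i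

-- loop 2 of A: for i in range(index, n): if text[i] in separators: end = i+1; break  (else end = n)
def aEnd (seps : List String) : List Char → Nat → Nat
  | [], i => i
  | c :: rest, i => if seps.contains (String.mk [c]) then i + 1 else aEnd seps rest (i + 1)

def deleteSentence (text : String) (index : Int) (separators : List String) : String :=
  if 0 ≤ index ∧ index < (text.toList.length : Int) then
    if separators = [] then ""
    else
      let cs := text.toList
      let i := index.toNat
      let start := aStart cs separators i
      let e := aEnd separators (cs.drop i) i
      -- text[:start] + text[end:] with 0 ≤ start ≤ end ≤ n: exact as take/drop
      String.mk (cs.take start ++ cs.drop e)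
  else ""  -- Python raises ValueError here; excluded by Pre_deleteSentence

-- ===== PORT B =====
-- [i for i, c in enumerate(text) if c in separators], carried with the running index
def enumFilter (seps : List String) : Nat → List Char → List Nat
  | _, [] => []
  | off, c :: rest =>
      if seps.contains (String.mk [c]) then off :: enumFilter seps (off + 1) rest
      else enumFilter seps (off + 1) rest

def deleteSentence_alt (text : String) (index : Int) (separators : List String) : String :=
  if 0 ≤ index ∧ index < (text.toList.length : Int) then
    if separators = [] then ""
    else
      let cs := text.toList
      let sepIdx := enumFilter separators 0 cs
      let before := sepIdx.filter (fun (p : Nat) => (p : Int) < index)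
      let after := sepIdx.filter (fun (p : Nat) => index ≤ (p : Int))
      let start : Nat := match before.getLast? with | some p => p + 1 | none => 0
      let e : Nat := match after.head? with | some p => p + 1 | none => cs.length
      String.mk (cs.take start ++ cs.drop e)
  else ""  -- Python raises ValueError here; excluded by Pre_deleteSentence

-- ===== PRECONDITION & SPEC =====
-- Pre_ excludes exactly the inputs where A raises ValueError (index out of range); B raises there too.
def Pre_deleteSentence (text : String) (index : Int) (separators : List String) : Prop :=
  0 ≤ index ∧ index < (text.toList.length : Int)
instance (text : String) (index : Int) (separators : List String) : Decidable (Pre_deleteSentence text index separators) := by unfold Pre_deleteSentence; infer_instance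

def pvWitness_deleteSentence : String × Int × List String := ("ab. cd! e", 5, [".", "!"])

def Spec_deleteSentence (text : String) (index : Int) (separators : List String) (out : String) : Prop := out = deleteSentence_alt text index separators
instance (text : String) (index : Int) (separators : List String) (out : String) : Decidable (Spec_deleteSentence text index separators out) := by unfold Spec_deleteSentence; infer_instance

-- ===== CLAIM (what is proved, stated in full; the proofs are below) =====
def Claim_equal_deleteSentence : Prop := ∀ (text : String) (index : Int) (separators : List String), Dom_deleteSentence text index separators → Pre_deleteSentence text index separators → Spec_deleteSentence text index separators (deleteSentence text index separators)

-- ===== LEMMAS AND PROOFS =====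

theorem enumFilter_append (seps : List String) (off : Nat) (l₁ l₂ : List Char) :
    enumFilter seps off (l₁ ++ l₂) = enumFilter seps off l₁ ++ enumFilter seps (off + l₁.length) l₂ := by
  induction l₁ generalizing off with
  | nil => simp [enumFilter]
  | cons c rest ih =>
      simp only [List.cons_append, enumFilter, ih, List.length_cons]
      split_ifs <;> simp <;> ring_nf

theorem enumFilter_bounds (seps : List String) (off : Nat) (l : List Char) :
    ∀ x ∈ enumFilter seps off l, off ≤ x ∧ x < off + l.length := by
  induction l generalizing off with
  | nil => simp [enumFilter]
  | cons c rest ih =>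
      intro x hx
      simp only [enumFilter] at hx
      split_ifs at hx with h
      · simp only [List.mem_cons] at hx
        simp only [List.length_cons]
        rcases hx with rfl | hx
        · omega
        · have := ih (off + 1) x hx; omega
      · simp only [List.length_cons]
        have := ih (off + 1) x hx; omega

-- loop 2 equals head of the position table from `off` on
theorem aEnd_eq (seps : List String) (l : List Char) (off : Nat) :
    aEnd seps l off = (match (enumFilter seps off l).head? with
      | some p => p + 1 | none => off + l.length) := by
  induction l generalizing off with
  | nil => simp [aEnd, enumFilter]
  | cons c rest ih =>
      simp only [aEnd, enumFilter]
      split_ifs with h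
      · simp
      · rw [ih]
        cases (enumFilter seps (off + 1) rest).head? with
        | none =>
            dsimp only
            simp only [List.length_cons]
            rw [Nat.add_assoc, Nat.add_comm 1]
        | some p => rfl

-- loop 1 equals last of the position table of the prefix before i
theorem aStart_eq (cs : List Char) (seps : List String) (i : Nat) (hi : i ≤ cs.length) :
    aStart cs seps i = (match (enumFilter seps 0 (cs.take i)).getLast? with
      | some p => p + 1 | none => 0) := by
  induction i with
  | zero => simp [aStart, enumFilter]
  | succ i ih =>
      have hlt : i < cs.length := by omega
      have htake : cs.take (i + 1) = cs.take i ++ [cs[i]] := by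
        rw [List.take_succ]; simp [List.getElem?_eq_getElem hlt]
      have hgetD : cs.getD i ' ' = cs[i] := by simp [List.getD, List.getElem?_eq_getElem hlt]
      rw [aStart, hgetD, htake, enumFilter_append]
      have hlen : (cs.take i).length = i := by simp [Nat.min_eq_left (le_of_lt hlt)]
      rw [hlen]
      split_ifs with h
      · have hone : enumFilter seps (0 + i) [cs[i]] = [0 + i] := by
          have hm : String.mk [cs[i]] ∈ seps := by simpa using h
          simp [enumFilter, hm]
        rw [hone, List.getLast?_concat]
        simp
      · have hnone : enumFilter seps (0 + i) [cs[i]] = [] := by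
          have hm : String.mk [cs[i]] ∉ seps := by simpa using h
          simp [enumFilter, hm]
        rw [hnone, List.append_nil]
        exact ih (by omega)

-- filtering `< i` keeps exactly the prefix part of the table, `≥ i` the suffix part
theorem filter_lt_enumFilter (seps : List String) (cs : List Char) (i : Nat) (hi : i ≤ cs.length) :
    (enumFilter seps 0 cs).filter (fun p => decide (p < i)) = enumFilter seps 0 (cs.take i) := by
  conv_lhs => rw [← List.take_append_drop i cs, enumFilter_append]
  rw [List.filter_append]
  have hlen : (cs.take i).length = i := by simp [Nat.min_eq_left hi]
  rw [hlen]
  have h1 : (enumFilter seps 0 (cs.take i)).filter (fun p => decide (p < i)) = enumFilter seps 0 (cs.take i) := by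
    apply List.filter_eq_self.2
    intro x hx
    have := enumFilter_bounds seps 0 (cs.take i) x hx
    simp only [hlen] at this
    simp; omega
  have h2 : (enumFilter seps (0 + i) (cs.drop i)).filter (fun p => decide (p < i)) = [] := by
    apply List.filter_eq_nil_iff.2
    intro x hx
    have := enumFilter_bounds seps (0 + i) (cs.drop i) x hx
    simp; omega
  rw [h1, h2, List.append_nil]

theorem filter_ge_enumFilter (seps : List String) (cs : List Char) (i : Nat) (hi : i ≤ cs.length) :
    (enumFilter seps 0 cs).filter (fun p => decide (i ≤ p)) = enumFilter seps i (cs.drop i) := by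
  conv_lhs => rw [← List.take_append_drop i cs, enumFilter_append]
  rw [List.filter_append]
  have hlen : (cs.take i).length = i := by simp [Nat.min_eq_left hi]
  rw [hlen]
  have h1 : (enumFilter seps 0 (cs.take i)).filter (fun p => decide (i ≤ p)) = [] := by
    apply List.filter_eq_nil_iff.2
    intro x hx
    have := enumFilter_bounds seps 0 (cs.take i) x hx
    simp only [hlen] at this
    simp; omega
  have h2 : (enumFilter seps (0 + i) (cs.drop i)).filter (fun p => decide (i ≤ p)) = enumFilter seps (0 + i) (cs.drop i) := by
    apply List.filter_eq_self.2
    intro x hx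
    have := enumFilter_bounds seps (0 + i) (cs.drop i) x hx
    simp; omega
  rw [h1, h2, List.nil_append]
  norm_num

-- ===== VERDICT (by name: the statement is the Claim_ definition above) =====
theorem deleteSentence_spec : Claim_equal_deleteSentence := by
  intro text index separators _ hpre
  unfold Spec_deleteSentence deleteSentence deleteSentence_alt
  obtain ⟨h0, hlt⟩ := hpre
  have hc : 0 ≤ index ∧ index < (text.toList.length : Int) := ⟨h0, hlt⟩
  rw [if_pos hc, if_pos hc]
  by_cases hsep : separators = []
  · simp [hsep]
  · rw [if_neg hsep, if_neg hsep]
    set cs := text.toList with hcs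
    set i := index.toNat with hiDef
    have hi : i ≤ cs.length := by
      have : (i : Int) = index := Int.toNat_of_nonneg h0
      omega
    -- the integer filters of B are the Nat filters on i
    have hbefore : cs.length = cs.length := rfl
    have hfl : (enumFilter separators 0 cs).filter (fun (p : Nat) => decide ((p : Int) < index)) =
        (enumFilter separators 0 cs).filter (fun p => decide (p < i)) := by
      apply List.filter_congr
      intro x _
      have : (i : Int) = index := Int.toNat_of_nonneg h0
      simp only [decide_eq_decide]; omega
    have hfg : (enumFilter separators 0 cs).filter (fun (p : Nat) => decide (index ≤ (p : Int))) =
        (enumFilter separators 0 cs).filter (fun p => decide (i ≤ p)) := by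
      apply List.filter_congr
      intro x _
      have : (i : Int) = index := Int.toNat_of_nonneg h0
      simp only [decide_eq_decide]; omega
    have hend : (match (enumFilter separators i (cs.drop i)).head? with
        | some p => p + 1 | none => i + (cs.drop i).length) =
        (match (enumFilter separators i (cs.drop i)).head? with
        | some p => p + 1 | none => cs.length) := by
      cases (enumFilter separators i (cs.drop i)).head? with
      | none =>
          dsimp only
          simp only [List.length_drop]
          exact Nat.add_sub_cancel' hi
      | some p => rfl
    dsimp only
    rw [hfl, hfg, filter_lt_enumFilter separators cs i hi, filter_ge_enumFilter separators cs i hi]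
    rw [aStart_eq cs separators i hi, aEnd_eq separators (cs.drop i) i, hend]
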